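-- pv_equiv track=rewrite | github.com/elidlocke/tenant-rent | helper_functions.py | termLookup
-- ===== SOURCE A (Python) =====
-- def termLookup(term):
--     '''
--     Take in a term, eg. winter 2019 and return dates for the four months
--     for the term
--     '''
--     term_info = term.split(' ')
--     term_dict = {'winter': ['01', '02', '03', '04'],
--                  'summer': ['05', '06', '07', '08'],
--                  'fall': ['09', '10', '11', '12']}
--
--     dates = []
--     for i in range(0,4):
--         date = "{}-{}-01 00:00:00".format(term_info[1],
--                 term_dict[term_info[0].lower()][i])
--         dates.append(date)
--     return dates
-- ===== SOURCE B (Python) =====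
-- def termLookup(term):
--     '''
--     Take in a term, eg. winter 2019 and return dates for the four months
--     for the term
--     '''
--     parts = term.split(' ')
--     year = parts[1]
--     quarter = ['winter', 'summer', 'fall'].index(parts[0].lower())
--     calendar = ["{}-{:02d}-01 00:00:00".format(year, m) for m in range(1, 13)]
--     return calendar[4 * quarter : 4 * quarter + 4]
-- ===== Notes on version B (the rewrite author's own statement) =====
-- stated objective: alternative
-- what changed: B drops the season-to-months table entirely: it builds the full 12-month calendar of date strings for the year in one pass, finds the season's quarter index with list.index, and returns the 4-wide slice calendar[4*q:4*q+4], instead of A's loop that formats four dates by indexing a precomputed per-season month table.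
import Mathlib
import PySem

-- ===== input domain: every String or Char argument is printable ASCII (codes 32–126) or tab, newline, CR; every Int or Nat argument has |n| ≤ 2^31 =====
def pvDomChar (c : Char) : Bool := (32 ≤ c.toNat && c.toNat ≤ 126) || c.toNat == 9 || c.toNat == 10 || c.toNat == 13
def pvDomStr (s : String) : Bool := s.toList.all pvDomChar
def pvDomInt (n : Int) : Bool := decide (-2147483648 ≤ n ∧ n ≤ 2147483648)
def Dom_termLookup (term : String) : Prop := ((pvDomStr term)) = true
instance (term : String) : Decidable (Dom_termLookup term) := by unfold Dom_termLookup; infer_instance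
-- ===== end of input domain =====

-- B has no season→months table: it builds the full 12-month calendar for the year and returns
-- the season's quarter as a slice (objective: alternative, same cost).

-- ===== PORT A =====
def termLookup (term : String) : List String :=
  let term_info := (PySem.Str.split? term " ").getD []   -- sep " " ≠ "", so split? is always some
  let term_dict : PySem.Dict String (List String) :=
    PySem.Dict.mk [("winter", ["01", "02", "03", "04"]),
                   ("summer", ["05", "06", "07", "08"]),
                   ("fall",   ["09", "10", "11", "12"])]
  (PySem.List.pyRange 0 4 1).foldl (fun dates i =>
    dates ++ [((PySem.List.pyGet? term_info 1).getD "") ++ "-" ++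
      ((PySem.List.pyGet?
          ((term_dict.get? (PySem.Str.lower ((PySem.List.pyGet? term_info 0).getD ""))).getD [])
          i).getD "") ++ "-01 00:00:00"]) []

-- ===== PORT B =====
def termLookup_alt (term : String) : List String :=
  let parts := (PySem.Str.split? term " ").getD []
  let year := (PySem.List.pyGet? parts 1).getD ""
  match PySem.List.index? ["winter", "summer", "fall"]
          (PySem.Str.lower ((PySem.List.pyGet? parts 0).getD "")) with
  | none => []   -- ValueError in Python; excluded by Pre_
  | some q =>
    let calendar := (PySem.List.pyRange 1 13 1).map (fun m =>
      year ++ "-" ++ PySem.Str.zfill (PySem.Int.toStr m) 2 ++ "-01 00:00:00")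
    PySem.List.slice calendar (some ((4 * q : Nat) : Int)) (some ((4 * q + 4 : Nat) : Int))

-- ===== PRECONDITION & SPEC =====
-- Pre_ excludes exactly the inputs where A raises: fewer than two space-separated pieces
-- (IndexError on term_info[1]) or a first piece whose lowercase is not a known season (KeyError).
def Pre_termLookup (term : String) : Prop :=
  2 ≤ ((PySem.Str.split? term " ").getD []).length ∧
  PySem.Str.lower ((PySem.List.pyGet? ((PySem.Str.split? term " ").getD []) 0).getD "")
    ∈ ["winter", "summer", "fall"]
instance (term : String) : Decidable (Pre_termLookup term) := by unfold Pre_termLookup; infer_instance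

def pvWitness_termLookup : String := "Fall 2018"

def Spec_termLookup (term : String) (out : List String) : Prop := out = termLookup_alt term
instance (term : String) (out : List String) : Decidable (Spec_termLookup term out) := by unfold Spec_termLookup; infer_instance

-- ===== CLAIM (what is proved, stated in full; the proofs are below) =====
def Claim_equal_termLookup : Prop := ∀ (term : String), Dom_termLookup term → Pre_termLookup term → Spec_termLookup term (termLookup term)

-- ===== LEMMAS AND PROOFS =====

theorem termLookup_eq_of_parts (term : String) (a b : String) (rest : List String)
    (hp : (PySem.Str.split? term " ").getD [] = a :: b :: rest)
    (hs : PySem.Str.lower a ∈ (["winter", "summer", "fall"] : List String)) :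
    termLookup term = termLookup_alt term := by
  have h0 : PySem.List.pyGet? (a :: b :: rest) (0 : Int) = some a :=
    PySem.List.pyGet?_zero_cons a (b :: rest)
  have h1 : PySem.List.pyGet? (a :: b :: rest) (1 : Int) = some b := by
    simp [PySem.List.pyGet?, PySem.List.pyIdx?]
  have hrA : PySem.List.pyRange 0 4 1 = [0, 1, 2, 3] := by decide
  have hr12 : PySem.List.pyRange 1 13 1 = [1, 2, 3, 4, 5, 6, 7, 8, 9, 10, 11, 12] := by decide
  have z1 : PySem.Str.zfill (PySem.Int.toStr 1) 2 = "01" := by decide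
  have z2 : PySem.Str.zfill (PySem.Int.toStr 2) 2 = "02" := by decide
  have z3 : PySem.Str.zfill (PySem.Int.toStr 3) 2 = "03" := by decide
  have z4 : PySem.Str.zfill (PySem.Int.toStr 4) 2 = "04" := by decide
  have z5 : PySem.Str.zfill (PySem.Int.toStr 5) 2 = "05" := by decide
  have z6 : PySem.Str.zfill (PySem.Int.toStr 6) 2 = "06" := by decide
  have z7 : PySem.Str.zfill (PySem.Int.toStr 7) 2 = "07" := by decide
  have z8 : PySem.Str.zfill (PySem.Int.toStr 8) 2 = "08" := by decide
  have z9 : PySem.Str.zfill (PySem.Int.toStr 9) 2 = "09" := by decide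
  have z10 : PySem.Str.zfill (PySem.Int.toStr 10) 2 = "10" := by decide
  have z11 : PySem.Str.zfill (PySem.Int.toStr 11) 2 = "11" := by decide
  have z12 : PySem.Str.zfill (PySem.Int.toStr 12) 2 = "12" := by decide
  simp only [List.mem_cons, List.not_mem_nil, or_false] at hs
  rcases hs with h | h | h
  · have hd : (PySem.Dict.mk [("winter", ["01", "02", "03", "04"]), ("summer", ["05", "06", "07", "08"]), ("fall", ["09", "10", "11", "12"])] : PySem.Dict String (List String)).get? "winter" = some ["01", "02", "03", "04"] := by decide
    have hq : PySem.List.index? (["winter", "summer", "fall"] : List String) "winter" = some 0 := by decide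
    have g0 : PySem.List.pyGet? (["01", "02", "03", "04"] : List String) (0 : Int) = some "01" := by decide
    have g1 : PySem.List.pyGet? (["01", "02", "03", "04"] : List String) (1 : Int) = some "02" := by decide
    have g2 : PySem.List.pyGet? (["01", "02", "03", "04"] : List String) (2 : Int) = some "03" := by decide
    have g3 : PySem.List.pyGet? (["01", "02", "03", "04"] : List String) (3 : Int) = some "04" := by decide
    unfold termLookup termLookup_alt
    rw [hp]
    simp only [h0, h1, h, Option.getD_some, hd, hq, hrA, hr12, List.map,
      z1, z2, z3, z4, z5, z6, z7, z8, z9, z10, z11, z12, g0, g1, g2, g3,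
      List.foldl, List.nil_append, List.cons_append]
    rw [PySem.List.slice_natCast]
    simp
  · have hd : (PySem.Dict.mk [("winter", ["01", "02", "03", "04"]), ("summer", ["05", "06", "07", "08"]), ("fall", ["09", "10", "11", "12"])] : PySem.Dict String (List String)).get? "summer" = some ["05", "06", "07", "08"] := by decide
    have hq : PySem.List.index? (["winter", "summer", "fall"] : List String) "summer" = some 1 := by decide
    have g0 : PySem.List.pyGet? (["05", "06", "07", "08"] : List String) (0 : Int) = some "05" := by decide
    have g1 : PySem.List.pyGet? (["05", "06", "07", "08"] : List String) (1 : Int) = some "06" := by decide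
    have g2 : PySem.List.pyGet? (["05", "06", "07", "08"] : List String) (2 : Int) = some "07" := by decide
    have g3 : PySem.List.pyGet? (["05", "06", "07", "08"] : List String) (3 : Int) = some "08" := by decide
    unfold termLookup termLookup_alt
    rw [hp]
    simp only [h0, h1, h, Option.getD_some, hd, hq, hrA, hr12, List.map,
      z1, z2, z3, z4, z5, z6, z7, z8, z9, z10, z11, z12, g0, g1, g2, g3,
      List.foldl, List.nil_append, List.cons_append]
    rw [PySem.List.slice_natCast]
    simp
  · have hd : (PySem.Dict.mk [("winter", ["01", "02", "03", "04"]), ("summer", ["05", "06", "07", "08"]), ("fall", ["09", "10", "11", "12"])] : PySem.Dict String (List String)).get? "fall" = some ["09", "10", "11", "12"] := by decide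
    have hq : PySem.List.index? (["winter", "summer", "fall"] : List String) "fall" = some 2 := by decide
    have g0 : PySem.List.pyGet? (["09", "10", "11", "12"] : List String) (0 : Int) = some "09" := by decide
    have g1 : PySem.List.pyGet? (["09", "10", "11", "12"] : List String) (1 : Int) = some "10" := by decide
    have g2 : PySem.List.pyGet? (["09", "10", "11", "12"] : List String) (2 : Int) = some "11" := by decide
    have g3 : PySem.List.pyGet? (["09", "10", "11", "12"] : List String) (3 : Int) = some "12" := by decide
    unfold termLookup termLookup_alt
    rw [hp]
    simp only [h0, h1, h, Option.getD_some, hd, hq, hrA, hr12, List.map,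
      z1, z2, z3, z4, z5, z6, z7, z8, z9, z10, z11, z12, g0, g1, g2, g3,
      List.foldl, List.nil_append, List.cons_append]
    rw [PySem.List.slice_natCast]
    simp

-- ===== VERDICT (by name: the statement is the Claim_ definition above) =====
theorem termLookup_spec : Claim_equal_termLookup := by
  intro term _ hpre
  obtain ⟨hlen, hs⟩ := hpre
  unfold Spec_termLookup
  match hp : (PySem.Str.split? term " ").getD [] with
  | [] => rw [hp] at hlen; simp at hlen
  | [a] => rw [hp] at hlen; simp at hlen
  | a :: b :: rest =>
    rw [hp, PySem.List.pyGet?_zero_cons, Option.getD_some] at hs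
    exact termLookup_eq_of_parts term a b rest hp hs
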